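-- pv_equiv track=rewrite | github.com/Chia-Network/clvm_tools | costs/generate-benchmark.py | generate_if
-- ===== SOURCE A (Python) =====
-- def generate_if(n):
--     ret = ''
--     # alternate between true and false
--     conditions = ['()', '(q . 1)']
--     for i in range(n):
--         ret += '(c (i %s (q . 1) (q . 2)) ' % conditions[i % 2]
--     ret += '()'
--     for i in range(n):
--         ret += ')'
--     return 'if-1-%d' % n, ret, '()'
-- ===== SOURCE B (Python) =====
-- def generate_if(n):
--     # the per-level pieces alternate between exactly two fixed strings, so the
--     # whole body is a closed form built by string repetition
--     m = max(n, 0)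
--     p0 = '(c (i () (q . 1) (q . 2)) '
--     p1 = '(c (i (q . 1) (q . 1) (q . 2)) '
--     ret = (p0 + p1) * (m // 2) + p0 * (m % 2) + '()' + ')' * m
--     return 'if-1-%d' % n, ret, '()'
-- ===== Notes on version B (the rewrite author's own statement) =====
-- stated objective: faster
-- what changed: Replaces A's two per-level loops (format-and-append one piece per level, then append one ')' per level) by a closed form: the pieces alternate between exactly two fixed strings, so the body is built with string repetition (p0+p1)*(n//2) + p0*(n%2) + '()' + ')'*n.
import Mathlib
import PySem

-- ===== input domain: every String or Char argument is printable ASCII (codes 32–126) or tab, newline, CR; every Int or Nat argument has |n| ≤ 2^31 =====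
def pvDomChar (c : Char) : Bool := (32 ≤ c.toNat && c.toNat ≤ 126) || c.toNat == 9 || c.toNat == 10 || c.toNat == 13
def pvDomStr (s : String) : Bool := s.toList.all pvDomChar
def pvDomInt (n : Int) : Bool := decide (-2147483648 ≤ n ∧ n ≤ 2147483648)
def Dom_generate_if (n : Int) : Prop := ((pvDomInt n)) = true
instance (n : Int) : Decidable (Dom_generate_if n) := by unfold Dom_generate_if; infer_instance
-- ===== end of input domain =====

-- B replaces A's per-level loops by a closed form (the pieces alternate between two fixed strings, repeated by string multiplication); measured faster.

-- ===== PORT A =====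
def generate_if (n : Int) : String × String × String :=
  let conditions : List String := ["()", "(q . 1)"]
  let ret : String :=
    (PySem.List.pyRange 0 n 1).foldl
      (fun r i =>
        r ++ "(c (i " ++ ((PySem.List.pyGet? conditions (PySem.Int.mod i 2)).getD "") ++ " (q . 1) (q . 2)) ")
      ""
  let ret := ret ++ "()"
  let ret :=
    (PySem.List.pyRange 0 n 1).foldl (fun r _ => r ++ ")") ret
  ("if-1-" ++ PySem.Int.toStr n, ret, "()")

-- ===== PORT B =====
-- Python's 's * k' (string repetition) is ported as PySem.List.pyRepeat on the char list (exact: both are k concatenated copies, empty for k ≤ 0).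
def generate_if_alt (n : Int) : String × String × String :=
  let m : Int := max n 0
  let p0 : String := "(c (i () (q . 1) (q . 2)) "
  let p1 : String := "(c (i (q . 1) (q . 1) (q . 2)) "
  let ret : String :=
    String.ofList (PySem.List.pyRepeat (p0 ++ p1).toList (PySem.Int.floordiv m 2))
    ++ String.ofList (PySem.List.pyRepeat p0.toList (PySem.Int.mod m 2))
    ++ "()"
    ++ String.ofList (PySem.List.pyRepeat [')'] m)
  ("if-1-" ++ PySem.Int.toStr n, ret, "()")

-- ===== PRECONDITION & SPEC =====
def Spec_generate_if (n : Int) (out : String × String × String) : Prop := out = generate_if_alt n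
instance (n : Int) (out : String × String × String) : Decidable (Spec_generate_if n out) := by unfold Spec_generate_if; infer_instance

-- ===== CLAIM (what is proved, stated in full; the proofs are below) =====
def Claim_equal_generate_if : Prop := ∀ (n : Int), Dom_generate_if n → Spec_generate_if n (generate_if n)

-- ===== LEMMAS AND PROOFS =====

theorem pv_floordiv_nat (k : Nat) : PySem.Int.floordiv (k:Int) 2 = ((k/2 : Nat) : Int) := by
  simp [PySem.Int.floordiv, Int.fdiv_eq_ediv]

theorem pv_mod_nat (k : Nat) : PySem.Int.mod (k:Int) 2 = ((k % 2 : Nat) : Int) := by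
  simp [PySem.Int.mod, Int.fmod_eq_emod]

theorem pv_repeat_zero (xs : List Char) : PySem.List.pyRepeat xs 0 = [] := by
  simp [PySem.List.pyRepeat]

theorem pv_repeat_succ (xs : List Char) (c : Int) (hc : 0 ≤ c) :
    PySem.List.pyRepeat xs (c+1) = PySem.List.pyRepeat xs c ++ xs := by
  simp only [PySem.List.pyRepeat]
  rw [show (c+1).toNat = c.toNat + 1 by omega]
  simp [List.replicate_succ']

-- A's opener pass over range(k) equals (p0 ++ p1) * (k // 2) + p0 * (k % 2)
theorem pv_open_closed (k : Nat) :
    (PySem.List.pyRange 0 (k:Int) 1).foldl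
      (fun r i =>
        r ++ "(c (i " ++ ((PySem.List.pyGet? ["()", "(q . 1)"] (PySem.Int.mod i 2)).getD "") ++ " (q . 1) (q . 2)) ")
      ""
    = String.ofList (PySem.List.pyRepeat (("(c (i () (q . 1) (q . 2)) " : String) ++ "(c (i (q . 1) (q . 1) (q . 2)) ").toList ((k/2 : Nat) : Int))
      ++ String.ofList (PySem.List.pyRepeat ("(c (i () (q . 1) (q . 2)) " : String).toList ((k % 2 : Nat) : Int)) := by
  induction k with
  | zero =>
      rw [PySem.List.pyRange_one_eq_nil (by norm_num)]
      simp [pv_repeat_zero, String.ofList_nil]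
  | succ k ih =>
      rw [show (((k+1:Nat)):Int) = ((k:Nat):Int) + 1 by push_cast; ring]
      rw [PySem.List.pyRange_one_succ_right (by positivity)]
      rw [List.foldl_append, ih]
      simp only [List.foldl_cons, List.foldl_nil]
      rw [pv_mod_nat]
      rcases Nat.mod_two_eq_zero_or_one k with hk | hk
      · -- k even: piece is p0; (k+1)/2 = k/2, (k+1)%2 = 1
        rw [hk]
        rw [show ((k+1)/2 : Nat) = (k/2 : Nat) by omega, show ((k+1) % 2 : Nat) = 1 by omega]
        rw [show (((1:Nat)):Int) = (0:Int) + 1 by norm_num, pv_repeat_succ _ _ le_rfl,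
            pv_repeat_zero, String.ofList_append, String.ofList_nil]
        simp only [String.empty_append]
        simp [String.append_assoc]
        decide
      · -- k odd: piece is p1; (k+1)/2 = k/2 + 1, (k+1)%2 = 0
        rw [hk]
        rw [show ((k+1)/2 : Nat) = (k/2 : Nat) + 1 by omega, show ((k+1) % 2 : Nat) = 0 by omega]
        simp only [Nat.cast_zero, Nat.cast_one]
        rw [show (((k/2+1:Nat)):Int) = ((k/2:Nat):Int) + 1 by push_cast; ring,
            pv_repeat_succ _ _ (by positivity), pv_repeat_zero, String.ofList_nil]
        rw [show PySem.List.pyRepeat ("(c (i () (q . 1) (q . 2)) " : String).toList 1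
              = ("(c (i () (q . 1) (q . 2)) " : String).toList from by decide]
        rw [show (("(c (i () (q . 1) (q . 2)) " : String) ++ "(c (i (q . 1) (q . 1) (q . 2)) ").toList
              = ("(c (i () (q . 1) (q . 2)) " : String).toList ++ ("(c (i (q . 1) (q . 1) (q . 2)) " : String).toList by simp]
        rw [String.ofList_append, String.ofList_append]
        simp [String.append_assoc]
-- A's closer pass over range(k) appends ')' * k
theorem pv_close_closed (k : Nat) (s : String) :
    (PySem.List.pyRange 0 (k:Int) 1).foldl (fun r _ => r ++ ")") s
      = s ++ String.ofList (PySem.List.pyRepeat [')'] ((k:Nat):Int)) := by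
  induction k generalizing s with
  | zero =>
      rw [PySem.List.pyRange_one_eq_nil (by norm_num)]
      simp [String.ofList_nil]
  | succ k ih =>
      rw [show (((k+1:Nat)):Int) = ((k:Nat):Int) + 1 by push_cast; ring]
      rw [PySem.List.pyRange_one_succ_right (by positivity)]
      rw [List.foldl_append, ih]
      simp only [List.foldl_cons, List.foldl_nil]
      rw [pv_repeat_succ _ _ (by positivity), String.ofList_append, ← String.append_assoc]

-- ===== VERDICT (by name: the statement is the Claim_ definition above) =====
theorem generate_if_spec : Claim_equal_generate_if := by
  intro n _
  unfold Spec_generate_if generate_if generate_if_alt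
  simp only
  by_cases h : 0 ≤ n
  · obtain ⟨k, hk⟩ : ∃ k : Nat, n = (k:Int) := ⟨n.toNat, (Int.toNat_of_nonneg h).symm⟩
    subst hk
    rw [show max ((k:Nat):Int) 0 = ((k:Nat):Int) by omega]
    rw [pv_floordiv_nat, pv_mod_nat, pv_open_closed, pv_close_closed]
  · rw [PySem.List.pyRange_one_eq_nil (by omega)]
    rw [show max n 0 = (0:Int) by omega]
    simp only [List.foldl_nil]
    rw [show PySem.Int.floordiv 0 2 = 0 from by decide, show PySem.Int.mod 0 2 = 0 from by decide]
    rw [pv_repeat_zero, pv_repeat_zero, pv_repeat_zero]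
    simp [String.ofList_nil]
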